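-- pv_equiv track=rewrite | github.com/Macielyoung/extraction | code/Transformer_TextClassification/data_loader.py | get_sentence_and_tag
-- ===== SOURCE A (Python) =====
-- def get_sentence_and_tag(lines):
--     sen_tag_data = []
--     one_line = []
--     for rid, line in enumerate(lines):
--         if rid % 2 == 0:
--             one_line.append(line.strip().split())
--         else:
--             one_line.append(line.strip().split())
--             sen_tag_data.append(one_line)
--             one_line = []
--     return sen_tag_data
-- ===== SOURCE B (Python) =====
-- def get_sentence_and_tag(lines):
--     toks = [line.strip().split() for line in lines]
--     return [[toks[i - 1], toks[i]] for i in range(1, len(toks), 2)]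
-- ===== Notes on version B (the rewrite author's own statement) =====
-- stated objective: alternative
-- what changed: Replaces the single-pass parity loop with a one_line accumulator by two staged passes: first tokenize every line into toks, then build the pairs by index arithmetic over range(1, len(toks), 2), which drops a trailing unpaired line because no odd index reaches it.
import Mathlib
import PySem

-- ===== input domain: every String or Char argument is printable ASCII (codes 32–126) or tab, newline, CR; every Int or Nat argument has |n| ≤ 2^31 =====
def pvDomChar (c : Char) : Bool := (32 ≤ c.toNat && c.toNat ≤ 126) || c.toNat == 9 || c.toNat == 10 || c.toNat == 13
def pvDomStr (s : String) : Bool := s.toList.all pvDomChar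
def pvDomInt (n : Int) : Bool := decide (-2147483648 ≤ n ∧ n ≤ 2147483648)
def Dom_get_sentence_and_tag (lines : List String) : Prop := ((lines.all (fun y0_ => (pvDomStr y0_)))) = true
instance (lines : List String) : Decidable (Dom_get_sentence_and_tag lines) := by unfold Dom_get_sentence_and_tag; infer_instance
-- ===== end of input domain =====

-- B replaces A's single-pass parity loop (one_line accumulator) by two staged passes:
-- tokenize every line first, then pair tokens by index arithmetic over range(1, len, 2).

-- ===== PORT A =====
-- A's loop body: even index appends the token list to one_line, odd index closes the pair.
def pvStepA (st : List (List (List String)) × List (List String)) (rl : Int × String) :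
    List (List (List String)) × List (List String) :=
  if rl.1 % 2 == 0 then (st.1, st.2 ++ [PySem.Str.split₀ (PySem.Str.strip rl.2)])
  else (st.1 ++ [st.2 ++ [PySem.Str.split₀ (PySem.Str.strip rl.2)]], [])

def get_sentence_and_tag (lines : List String) : List (List (List String)) :=
  ((PySem.List.enumerate lines 0).foldl pvStepA ([], [])).1

-- ===== PORT B =====
-- toks = [line.strip().split() for line in lines]; [[toks[i-1], toks[i]] for i in range(1, len(toks), 2)].
-- Every index drawn from range(1, len(toks), 2) (and its predecessor) is in range, so the
-- pyGetD default [] is never used and indexing is exact.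
def get_sentence_and_tag_alt (lines : List String) : List (List (List String)) :=
  let toks := lines.map (fun line => PySem.Str.split₀ (PySem.Str.strip line))
  (PySem.List.pyRange 1 (toks.length : Int) 2).map
    (fun i => [PySem.List.pyGetD toks (i - 1) [], PySem.List.pyGetD toks i []])

-- ===== PRECONDITION & SPEC =====
def Spec_get_sentence_and_tag (lines : List String) (out : List (List (List String))) : Prop := out = get_sentence_and_tag_alt lines
instance (lines : List String) (out : List (List (List String))) : Decidable (Spec_get_sentence_and_tag lines out) := by unfold Spec_get_sentence_and_tag; infer_instance

-- ===== CLAIM (what is proved, stated in full; the proofs are below) =====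
def Claim_equal_get_sentence_and_tag : Prop := ∀ (lines : List String), Dom_get_sentence_and_tag lines → Spec_get_sentence_and_tag lines (get_sentence_and_tag lines)

-- ===== LEMMAS AND PROOFS =====

-- Proof-only middle point: consecutive pairs of a list, dropping a trailing unpaired element.
def pvPairs {α : Type} : List α → List (List α)
  | a :: b :: rest => [a, b] :: pvPairs rest
  | _ => []

-- A's fold produces exactly the consecutive pairs of the mapped list.
theorem pvLoopA (lines : List String) :
    ∀ (n : Int), n % 2 = 0 → ∀ (acc : List (List (List String))),
    ((PySem.List.enumerate lines n).foldl pvStepA (acc, [])).1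
      = acc ++ pvPairs (lines.map (fun line => PySem.Str.split₀ (PySem.Str.strip line))) := by
  induction lines using pvPairs.induct with
  | case1 a b rest ih =>
      intro n hn acc
      have h1 : (n % 2 == 0) = true := by simp; omega
      have h2 : ((n + 1) % 2 == 0) = false := by simp; omega
      simp only [PySem.List.enumerate_cons, List.foldl_cons, pvStepA, h1, h2,
        if_true, if_false, Bool.false_eq_true]
      rw [ih (n + 1 + 1) (by omega) _]
      simp [pvPairs]
  | case2 lines hshape =>
      intro n hn acc
      cases lines with
      | nil => simp [PySem.List.enumerate_nil, pvPairs]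
      | cons a t =>
        cases t with
        | nil =>
            have h1 : (n % 2 == 0) = true := by simp; omega
            simp [PySem.List.enumerate_cons, PySem.List.enumerate_nil, pvStepA, h1, pvPairs]
        | cons b rest => exact absurd rfl (hshape a b rest)

-- B's indexed comprehension over range(1, len, 2) also produces the consecutive pairs.
theorem pvLoopB (toks : List (List String)) :
    (PySem.List.pyRange 1 (toks.length : Int) 2).map
      (fun i => [PySem.List.pyGetD toks (i - 1) [], PySem.List.pyGetD toks i []])
      = pvPairs toks := by
  induction toks using pvPairs.induct with
  | case1 a b rest ih =>
      rw [PySem.List.pyRange_of_pos _ _ (by norm_num)] at ih ⊢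
      have hc : ((((a :: b :: rest).length : Int) - 1 + 2 - 1) / 2).toNat
          = (((rest.length : Int) - 1 + 2 - 1) / 2).toNat + 1 := by
        simp only [List.length_cons]
        push_cast
        omega
      by_cases hlt : (1 : Int) < rest.length
      · have hlt2 : (1 : Int) < ((a :: b :: rest).length : Int) := by
          simp only [List.length_cons]; push_cast; omega
        rw [if_pos hlt2, hc, List.range_succ_eq_map]
        rw [if_pos hlt] at ih
        simp only [List.map_cons, List.map_map]
        rw [pvPairs]
        congr 1
        · norm_num [PySem.List.pyGetD]
        · rw [← ih, List.map_map]
          apply List.map_congr_left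
          intro k _
          simp only [Function.comp, Nat.succ_eq_add_one]
          have e1 : (1 : Int) + 2 * ((k + 1 : Nat) : Int) - 1 = ((2 * k + 2 : Nat) : Int) := by push_cast; omega
          have e2 : (1 : Int) + 2 * ((k + 1 : Nat) : Int) = ((2 * k + 3 : Nat) : Int) := by push_cast; omega
          have e3 : (1 : Int) + 2 * ↑k - 1 = ((2 * k : Nat) : Int) := by push_cast; omega
          have e4 : (1 : Int) + 2 * ↑k = ((2 * k + 1 : Nat) : Int) := by push_cast; omega
          rw [e1, e2, e3, e4]
          simp only [PySem.List.pyGetD_natCast]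
          rw [show 2 * k + 2 = 2 * k + 1 + 1 from by omega,
            show 2 * k + 3 = 2 * k + 1 + 1 + 1 from by omega]
          simp
      · -- rest has length 0 or 1: both ranges are a single / empty step accordingly
        have hr : ¬ (1 : Int) < ((rest.length : Int)) := hlt
        rw [if_neg hr] at ih
        have hlt2 : (1 : Int) < ((a :: b :: rest).length : Int) := by
          simp only [List.length_cons]; push_cast; omega
        rw [if_pos hlt2, hc]
        have h0 : (((rest.length : Int) - 1 + 2 - 1) / 2).toNat = 0 := by
          have : (rest.length : Int) ≤ 1 := by omega
          omega
        rw [h0]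
        simp [List.range_succ]
        rw [pvPairs]
        have : pvPairs rest = [] := by
          cases rest with
          | nil => rfl
          | cons x t =>
            cases t with
            | nil => rfl
            | cons y s =>
                exfalso
                simp only [List.length_cons] at hr
                push_cast at hr
                omega
        rw [this]
        norm_num [PySem.List.pyGetD]
  | case2 toks hshape =>
      rw [PySem.List.pyRange_of_pos _ _ (by norm_num)]
      cases toks with
      | nil => simp [pvPairs]
      | cons a t =>
        cases t with
        | nil =>
            rw [if_neg (by simp)]
            simp [pvPairs]
        | cons b rest => exact absurd rfl (hshape a b rest)

theorem get_sentence_and_tag_spec : Claim_equal_get_sentence_and_tag := by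
  intro lines _
  unfold Spec_get_sentence_and_tag get_sentence_and_tag get_sentence_and_tag_alt
  rw [pvLoopB]
  simpa using pvLoopA lines 0 (by decide) []
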